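-- pv_equiv track=rewrite | github.com/daniel-reich/turbo-robot | 6LAgr6EGHKoZWGhjd_12.py | final_direction
-- ===== SOURCE A (Python) =====
-- def final_direction(initial, turns):
--   for x in range(len(turns)):
--     if initial== 'N':
--       if turns[x]=='L':
--         initial ='W'
--       if turns[x]=='R':
--         initial='E'
--     elif initial== 'E':
--       if turns[x]=='L':
--         initial = 'N'
--       if turns[x]=='R':
--         initial='S'
--     elif initial== 'S':
--       if turns[x]=='L':
--         initial = 'E'
--       if turns[x]=='R':
--         initial='W'
--     elif initial== 'W':
--       if turns[x]=='L':
--         initial = 'S'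
--       if turns[x]=='R':
--         initial='N'
--   return initial
-- ===== SOURCE B (Python) =====
-- def final_direction(initial, turns):
--     order = ['N', 'E', 'S', 'W']
--     if initial not in order:
--         return initial
--     net = sum(1 if t == 'R' else -1 if t == 'L' else 0 for t in turns)
--     return order[(order.index(initial) + net) % 4]
-- ===== Notes on version B (the rewrite author's own statement) =====
-- stated objective: simpler
-- what changed: Replaces the 4-state per-step transition table with one accumulation of a net turn count (+1 for 'R', -1 for 'L') and a single closed-form modular index into the ordered direction list ['N','E','S','W'].
import Mathlib
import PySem

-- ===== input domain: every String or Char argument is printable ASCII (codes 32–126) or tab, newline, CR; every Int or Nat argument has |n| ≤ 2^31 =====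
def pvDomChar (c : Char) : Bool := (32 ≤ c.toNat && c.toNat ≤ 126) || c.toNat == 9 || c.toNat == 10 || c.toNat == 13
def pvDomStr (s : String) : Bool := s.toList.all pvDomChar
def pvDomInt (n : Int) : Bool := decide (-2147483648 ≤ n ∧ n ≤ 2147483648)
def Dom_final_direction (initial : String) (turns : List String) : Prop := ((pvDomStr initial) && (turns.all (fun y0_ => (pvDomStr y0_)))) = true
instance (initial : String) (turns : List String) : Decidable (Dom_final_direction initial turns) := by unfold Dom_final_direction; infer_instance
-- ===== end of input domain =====

-- B replaces A's per-step 4-state transition table with a net turn count and one modular index (objective: simpler).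


-- ===== PORT A =====
-- one iteration of A's loop body: the chained ifs, in source order
def pvStepA (initial t : String) : String :=
  if initial = "N" then
    let i1 := if t = "L" then "W" else initial
    if t = "R" then "E" else i1
  else if initial = "E" then
    let i1 := if t = "L" then "N" else initial
    if t = "R" then "S" else i1
  else if initial = "S" then
    let i1 := if t = "L" then "E" else initial
    if t = "R" then "W" else i1
  else if initial = "W" then
    let i1 := if t = "L" then "S" else initial
    if t = "R" then "N" else i1
  else initial

def final_direction (initial : String) (turns : List String) : String :=
  turns.foldl pvStepA initial

-- ===== PORT B =====
def pvDelta (t : String) : Int := if t = "R" then 1 else if t = "L" then -1 else 0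

def final_direction_alt (initial : String) (turns : List String) : String :=
  if initial ∈ ["N", "E", "S", "W"] then
    (PySem.List.pyGet? ["N", "E", "S", "W"]
      (PySem.Int.mod (((PySem.List.index? ["N", "E", "S", "W"] initial).getD 0 : Int)
        + (turns.map pvDelta).sum) 4)).getD initial
  else initial

-- ===== PRECONDITION & SPEC =====
def Spec_final_direction (initial : String) (turns : List String) (out : String) : Prop := out = final_direction_alt initial turns
instance (initial : String) (turns : List String) (out : String) : Decidable (Spec_final_direction initial turns out) := by unfold Spec_final_direction; infer_instance

-- ===== CLAIM (what is proved, stated in full; the proofs are below) =====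
def Claim_equal_final_direction : Prop := ∀ (initial : String) (turns : List String), Dom_final_direction initial turns → Spec_final_direction initial turns (final_direction initial turns)

-- ===== LEMMAS AND PROOFS =====
def pvOrder : List String := ["N", "E", "S", "W"]

def pvToIdx (s : String) : Int :=
  if s = "N" then 0 else if s = "E" then 1 else if s = "S" then 2 else 3

def pvToDir (k : Int) : String :=
  if k % 4 = 0 then "N" else if k % 4 = 1 then "E" else if k % 4 = 2 then "S" else "W"

lemma pvToDir_mem (k : Int) : pvToDir k ∈ pvOrder := by
  unfold pvToDir pvOrder; split_ifs <;> simp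

lemma pvToIdx_toDir (k : Int) : pvToIdx (pvToDir k) = k % 4 := by
  unfold pvToDir pvToIdx
  have h0 : (0:Int) ≤ k % 4 := Int.emod_nonneg k (by norm_num)
  have h1 : k % 4 < 4 := Int.emod_lt_of_pos k (by norm_num)
  split_ifs <;> simp_all <;> omega

lemma pvToDir_emod (a b : Int) : pvToDir (a % 4 + b) = pvToDir (a + b) := by
  unfold pvToDir
  have h : (a % 4 + b) % 4 = (a + b) % 4 := by omega
  rw [h]

lemma pvStepA_mem (initial t : String) (h : initial ∈ pvOrder) :
    pvStepA initial t = pvToDir (pvToIdx initial + pvDelta t) := by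
  unfold pvOrder at h
  simp only [List.mem_cons, List.not_mem_nil, or_false] at h
  have h4 : (0:Int) % 4 = 0 := by decide
  rcases h with h | h | h | h <;> subst h <;>
    unfold pvStepA pvToIdx pvDelta pvToDir <;>
    by_cases hR : t = "R" <;> by_cases hL : t = "L" <;> simp_all

lemma pvFoldA (turns : List String) : ∀ (initial : String), initial ∈ pvOrder →
    turns.foldl pvStepA initial = pvToDir (pvToIdx initial + (turns.map pvDelta).sum) := by
  induction turns with
  | nil =>
    intro initial h
    unfold pvOrder at h
    simp only [List.mem_cons, List.not_mem_nil, or_false] at h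
    rcases h with h | h | h | h <;> subst h <;> simp [pvToIdx, pvToDir]
  | cons t ts ih =>
    intro initial h
    have hs : pvStepA initial t = pvToDir (pvToIdx initial + pvDelta t) := pvStepA_mem initial t h
    calc (t :: ts).foldl pvStepA initial = ts.foldl pvStepA (pvStepA initial t) := rfl
      _ = pvToDir (pvToIdx (pvStepA initial t) + (ts.map pvDelta).sum) := by
          exact ih _ (hs ▸ pvToDir_mem _)
      _ = pvToDir (pvToIdx initial + ((t :: ts).map pvDelta).sum) := by
          rw [hs, pvToIdx_toDir, pvToDir_emod]
          simp [List.map_cons, List.sum_cons]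
          ring_nf

lemma pvStepA_not_mem (initial t : String) (h : initial ∉ pvOrder) :
    pvStepA initial t = initial := by
  unfold pvOrder at h
  simp only [List.mem_cons, List.not_mem_nil, or_false] at h
  push Not at h
  unfold pvStepA
  simp [h.1, h.2.1, h.2.2.1, h.2.2.2]

lemma pvFoldA_not_mem (turns : List String) (initial : String) (h : initial ∉ pvOrder) :
    turns.foldl pvStepA initial = initial := by
  induction turns with
  | nil => rfl
  | cons t ts ih => simp only [List.foldl_cons, pvStepA_not_mem initial t h]; exact ih

lemma pvAlt_mem (initial : String) (turns : List String) (h : initial ∈ pvOrder) :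
    final_direction_alt initial turns = pvToDir (pvToIdx initial + (turns.map pvDelta).sum) := by
  unfold final_direction_alt
  rw [if_pos (by unfold pvOrder at h; exact h)]
  have hidx : ((PySem.List.index? ["N","E","S","W"] initial).getD 0 : Int) = pvToIdx initial := by
    unfold pvOrder at h
    simp only [List.mem_cons, List.not_mem_nil, or_false] at h
    rcases h with h | h | h | h <;> subst h <;> decide
  rw [hidx]
  set k : Int := pvToIdx initial + (turns.map pvDelta).sum with hk
  have hm : PySem.Int.mod k 4 = k % 4 := PySem.Int.mod_eq_emod_of_pos (by norm_num)
  have h0 : (0:Int) ≤ k % 4 := Int.emod_nonneg k (by norm_num)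
  have h1 : k % 4 < 4 := Int.emod_lt_of_pos k (by norm_num)
  rw [hm]
  have hc : k % 4 = 0 ∨ k % 4 = 1 ∨ k % 4 = 2 ∨ k % 4 = 3 := by omega
  rcases hc with hc | hc | hc | hc <;> rw [hc] <;> unfold pvToDir <;> simp [hc, PySem.List.pyGet?, PySem.List.pyIdx?]

-- ===== VERDICT (by name: the statement is the Claim_ definition above) =====
theorem final_direction_spec : Claim_equal_final_direction := by
  intro initial turns _
  unfold Spec_final_direction final_direction
  by_cases h : initial ∈ pvOrder
  · rw [pvFoldA turns initial h, pvAlt_mem initial turns h]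
  · rw [pvFoldA_not_mem turns initial h]
    unfold final_direction_alt
    rw [if_neg (by unfold pvOrder at h; exact h)]
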